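-- pv_equiv track=rewrite | github.com/msabramo/Doula | doula/views/services_view.py | get_proper_version_name
-- ===== SOURCE A (Python) =====
-- def get_proper_version_name(version):
--     # alextodo. i think this code is duplicated.
--     # Since the package name needs to be different
--     # then the actual git tag, we put it back here
--     # so that we can link to the right commit in GitHub
--     # this is needed as a helper
--     version_list = version.split('-')
--     version_number = version_list.pop(0)
--     branch_name = ''
--
--     for part in version_list:
--         branch_name += part + '_'
--
--     if branch_name:
--         return version_number + '-' + branch_name.rstrip('_')
--     else:
--         return version_number
-- ===== SOURCE B (Python) =====
-- def get_proper_version_name(version):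
--     idx = version.find('-')
--     if idx == -1:
--         return version
--     return version[:idx] + '-' + version[idx+1:].replace('-', '_').rstrip('_')
-- ===== Notes on version B (the rewrite author's own statement) =====
-- stated objective: idiomatic
-- what changed: Replaces A's split/pop/accumulator-loop/conditional-rejoin with a direct find of the first '-', slicing, and a single replace('-','_') followed by rstrip('_'); no list of parts and no loop is built.
import Mathlib
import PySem

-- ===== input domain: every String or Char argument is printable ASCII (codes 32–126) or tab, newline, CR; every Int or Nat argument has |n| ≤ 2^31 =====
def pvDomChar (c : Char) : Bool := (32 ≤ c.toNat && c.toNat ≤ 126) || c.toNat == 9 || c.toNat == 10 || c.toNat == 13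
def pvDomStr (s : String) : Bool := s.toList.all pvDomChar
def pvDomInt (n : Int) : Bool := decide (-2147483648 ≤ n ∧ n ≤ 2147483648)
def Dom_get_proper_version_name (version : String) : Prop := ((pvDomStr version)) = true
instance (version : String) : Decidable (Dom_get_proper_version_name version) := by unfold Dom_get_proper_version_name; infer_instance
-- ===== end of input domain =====

-- B replaces A's split/pop/accumulator-loop/conditional-rejoin with find + slicing + one replace/rstrip (idiomatic; same cost).

-- hand port of Python's s.rstrip('_') (single strip character, used by both sources): drop trailing '_'; exact.
def pvRstripU (l : List Char) : List Char := (l.reverse.dropWhile (· == '_')).reverse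

-- ===== PORT A =====
def get_proper_version_name (version : String) : String :=
  let version_list := PySem.Chars.splitOn version.toList ['-']
  -- version_list.pop(0): str.split always returns at least one piece, so pop(0) never raises
  let version_number := version_list.headI
  let version_list' := version_list.tail
  let branch_name := version_list'.foldl (fun acc part => acc ++ part ++ ['_']) ([] : List Char)
  if branch_name ≠ [] then
    String.ofList (version_number ++ ['-'] ++ pvRstripU branch_name)
  else
    String.ofList version_number

-- ===== PORT B =====
def get_proper_version_name_alt (version : String) : String :=
  let cs := version.toList
  let idx := PySem.Chars.find cs ['-']
  if idx = -1 then version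
  else
    String.ofList (cs.take idx.toNat ++ ['-'] ++
      pvRstripU (PySem.Chars.replace (cs.drop (idx.toNat + 1)) ['-'] ['_']))

-- ===== PRECONDITION & SPEC =====
def Spec_get_proper_version_name (version : String) (out : String) : Prop := out = get_proper_version_name_alt version
instance (version : String) (out : String) : Decidable (Spec_get_proper_version_name version out) := by unfold Spec_get_proper_version_name; infer_instance

-- ===== CLAIM (what is proved, stated in full; the proofs are below) =====
def Claim_equal_get_proper_version_name : Prop := ∀ (version : String), Dom_get_proper_version_name version → Spec_get_proper_version_name version (get_proper_version_name version)

-- ===== LEMMAS AND PROOFS =====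

-- reference split on a single '-' character, and the single-character replacement map
def pvSplitA : List Char → List (List Char)
  | [] => [[]]
  | c :: t => if c = '-' then [] :: pvSplitA t
              else (c :: (pvSplitA t).headI) :: (pvSplitA t).tail

def pvMapRepl (l : List Char) : List Char := l.map (fun c => if c = '-' then '_' else c)

theorem pvSplitA_ne_nil (l : List Char) : pvSplitA l ≠ [] := by
  cases l with
  | nil => simp [pvSplitA]
  | cons c t => by_cases h : c = '-' <;> simp [pvSplitA, h]

theorem pvSplitA_cons (l : List Char) : ∃ x xs, pvSplitA l = x :: xs := by
  cases ht : pvSplitA l with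
  | nil => exact absurd ht (pvSplitA_ne_nil l)
  | cons x xs => exact ⟨x, xs, rfl⟩

theorem pv_go_eq (fuel : Nat) (l cur : List Char) (acc : List (List Char)) (h : l.length ≤ fuel) :
    PySem.Chars.splitOn.go ['-'] fuel l cur acc =
      acc.reverse ++ (cur.reverse ++ (pvSplitA l).headI) :: (pvSplitA l).tail := by
  induction fuel generalizing l cur acc with
  | zero =>
    cases l with
    | nil => rw [PySem.Chars.splitOn.go]; simp [pvSplitA]
    | cons c t => simp at h
  | succ f ih =>
    cases l with
    | nil => simp [PySem.Chars.splitOn.go, pvSplitA]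
    | cons c t =>
      rw [PySem.Chars.splitOn.go]
      simp only [List.isPrefixOf, Bool.and_true]
      simp only [List.length_cons] at h
      by_cases hc : c = '-'
      · subst hc
        simp only [BEq.rfl, if_pos]
        have hd : List.drop (['-'] : List Char).length ('-' :: t) = t := by simp
        rw [hd, ih t [] (cur.reverse :: acc) (by omega)]
        obtain ⟨x, xs, ht⟩ := pvSplitA_cons t
        simp [pvSplitA, ht]
      · have hb : ('-' == c) = false := beq_eq_false_iff_ne.mpr (Ne.symm hc)
        rw [hb, if_neg (by simp)]
        rw [ih t (c :: cur) acc (by omega)]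
        obtain ⟨x, xs, ht⟩ := pvSplitA_cons t
        simp [pvSplitA, hc, ht]

theorem pv_splitOn_eq (cs : List Char) : PySem.Chars.splitOn cs ['-'] = pvSplitA cs := by
  rw [PySem.Chars.splitOn, pv_go_eq (cs.length + 1) cs [] [] (by omega)]
  obtain ⟨x, xs, ht⟩ := pvSplitA_cons cs
  simp [ht]

theorem pv_foldl_branch (parts : List (List Char)) (acc : List Char) :
    parts.foldl (fun a p => a ++ p ++ ['_']) acc = acc ++ parts.flatMap (· ++ ['_']) := by
  induction parts generalizing acc with
  | nil => simp
  | cons p ps ih => simp [List.flatMap_cons, ih, List.append_assoc, List.flatMap_def]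

theorem pv_flat_splitA (r : List Char) :
    (pvSplitA r).flatMap (· ++ ['_']) = pvMapRepl r ++ ['_'] := by
  induction r with
  | nil => simp [pvSplitA, pvMapRepl]
  | cons c t ih =>
    by_cases hc : c = '-'
    · simp [pvSplitA, hc, pvMapRepl, ih]
    · obtain ⟨x, xs, ht⟩ := pvSplitA_cons t
      rw [ht] at ih
      simp only [pvSplitA, if_neg hc, ht, List.headI, List.tail,
        List.flatMap_cons, List.cons_append] at *
      simp [pvMapRepl, hc] at *
      simpa [List.append_assoc] using ih

theorem pv_replace_go (fuel : Nat) (l acc : List Char) (h : l.length ≤ fuel) :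
    PySem.Chars.replace.go ['-'] ['_'] fuel l acc = acc.reverse ++ pvMapRepl l := by
  induction fuel generalizing l acc with
  | zero =>
    cases l with
    | nil => rw [PySem.Chars.replace.go]; simp [pvMapRepl]
    | cons c t => simp at h
  | succ f ih =>
    cases l with
    | nil => simp [PySem.Chars.replace.go, pvMapRepl]
    | cons c t =>
      rw [PySem.Chars.replace.go]
      simp only [List.isPrefixOf, Bool.and_true, List.length_cons] at *
      by_cases hc : c = '-'
      · subst hc
        simp only [BEq.rfl, if_pos]
        have hd : List.drop (([] : List Char).length + 1) ('-' :: t) = t := rfl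
        rw [hd, ih t _ (by omega)]
        simp [pvMapRepl]
      · have hb : ('-' == c) = false := beq_eq_false_iff_ne.mpr (Ne.symm hc)
        rw [hb, if_neg (by simp)]
        rw [ih t _ (by omega)]
        simp [pvMapRepl, hc]

theorem pv_replace_eq (cs : List Char) :
    PySem.Chars.replace cs ['-'] ['_'] = pvMapRepl cs := by
  rw [PySem.Chars.replace]
  simp only [List.isEmpty_cons, Bool.false_eq_true, if_false]
  exact pv_replace_go cs.length cs [] (le_refl _)

theorem pv_find_none (l : List Char) (k : Nat) (h : '-' ∉ l) :
    PySem.Chars.find.go ['-'] l k = -1 := by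
  induction l generalizing k with
  | nil => rw [PySem.Chars.find.go.eq_def]; simp
  | cons c t ih =>
    simp only [List.mem_cons, not_or] at h
    rw [PySem.Chars.find.go.eq_def]
    have hb : ('-' == c) = false := beq_eq_false_iff_ne.mpr h.1
    simp only [List.isPrefixOf, hb, Bool.false_and, Bool.false_eq_true, if_false]
    exact ih _ h.2

theorem pv_find_split (p r : List Char) (k : Nat) (h : '-' ∉ p) :
    PySem.Chars.find.go ['-'] (p ++ '-' :: r) k = (k : Int) + p.length := by
  induction p generalizing k with
  | nil =>
    rw [PySem.Chars.find.go.eq_def]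
    simp [List.isPrefixOf]
  | cons c t ih =>
    simp only [List.mem_cons, not_or] at h
    rw [PySem.Chars.find.go.eq_def]
    have hb : ('-' == c) = false := beq_eq_false_iff_ne.mpr h.1
    simp only [List.cons_append, List.isPrefixOf, hb, Bool.false_and, Bool.false_eq_true, if_false]
    rw [ih (k+1) h.2]
    simp only [List.length_cons]
    push_cast
    omega

theorem pv_decompose (cs : List Char) :
    '-' ∉ cs ∨ ∃ p r, cs = p ++ '-' :: r ∧ '-' ∉ p := by
  induction cs with
  | nil => left; simp
  | cons c t ih =>
    by_cases hc : c = '-'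
    · right; exact ⟨[], t, by simp [hc], by simp⟩
    · rcases ih with h | ⟨p, r, rfl, hp⟩
      · left
        simp only [List.mem_cons, not_or]
        exact ⟨fun hh => hc hh.symm, h⟩
      · right
        exact ⟨c :: p, r, rfl, by
          simp only [List.mem_cons, not_or]
          exact ⟨fun hh => hc hh.symm, hp⟩⟩

theorem pv_splitA_no_dash (cs : List Char) (h : '-' ∉ cs) : pvSplitA cs = [cs] := by
  induction cs with
  | nil => rfl
  | cons c t ih =>
    simp only [List.mem_cons, not_or] at h
    have hc : ¬ c = '-' := fun hh => h.1 hh.symm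
    simp [pvSplitA, hc, ih h.2]

theorem pv_splitA_split (p r : List Char) (h : '-' ∉ p) :
    pvSplitA (p ++ '-' :: r) = p :: pvSplitA r := by
  induction p with
  | nil => simp [pvSplitA]
  | cons c t ih =>
    simp only [List.mem_cons, not_or] at h
    have hc : ¬ c = '-' := fun hh => h.1 hh.symm
    obtain ⟨x, xs, ht⟩ := pvSplitA_cons (t ++ '-' :: r)
    simp [pvSplitA, hc, ih h.2]

theorem pv_rstrip_append (x : List Char) : pvRstripU (x ++ ['_']) = pvRstripU x := by
  unfold pvRstripU
  rw [List.reverse_append]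
  norm_num [List.dropWhile_cons]

-- ===== VERDICT (by name: the statement is the Claim_ definition above) =====
theorem get_proper_version_name_spec : Claim_equal_get_proper_version_name := by
  intro version _
  unfold Spec_get_proper_version_name get_proper_version_name get_proper_version_name_alt
  dsimp only
  rcases pv_decompose version.toList with h | ⟨p, r, hcs, hp⟩
  · simp only [PySem.Chars.find, pv_find_none _ _ h, pv_splitOn_eq,
      pv_splitA_no_dash _ h, List.headI, List.tail_cons, List.foldl_nil]
    simp [String.ofList_toList]
  · have hfind : PySem.Chars.find (p ++ '-' :: r) ['-'] = (p.length : Int) := by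
      rw [PySem.Chars.find, pv_find_split p r 0 hp]; omega
    rw [hcs, hfind, pv_splitOn_eq, pv_splitA_split p r hp]
    simp only [List.headI, List.tail_cons]
    rw [pv_foldl_branch, pv_flat_splitA]
    simp only [List.nil_append]
    rw [if_pos (by simp), if_neg (by omega)]
    have htoNat : ((p.length : Int)).toNat = p.length := by omega
    rw [htoNat, pv_replace_eq]
    have htake : (p ++ '-' :: r).take p.length = p := by
      simpa using List.take_left p ('-' :: r)
    have hdrop : (p ++ '-' :: r).drop (p.length + 1) = r := by
      have hre : p ++ '-' :: r = (p ++ ['-']) ++ r := by simp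
      rw [hre]
      have hl : (p ++ ['-']).length = p.length + 1 := by simp
      rw [← hl, List.drop_left]
    rw [htake, hdrop, pv_rstrip_append]
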